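-- pv_equiv track=rewrite | github.com/urmoi/AdventOfCode | day07/day07.py | operation_check
-- ===== SOURCE A (Python) =====
-- OPERATORS = {0: 'sum', 1: 'mul'}
--
-- def equation_is_correct(test, numbers, op_seq):
--     value = numbers[0]
--     for op, number in zip(op_seq, numbers[1:]):
--         if op == '0':
--             value += number
--         elif op == '1':
--             value *= number
--
--         if value > test:
--             return False
--     return value == test
--
-- def operation_check(test, numbers):
--     n_bit = (len(numbers)-1)
--     f_bit = f'0{n_bit}b'
--     n = len(OPERATORS) ** n_bit
--
--     for op_n in range(n): # loop over every operation combination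
--         op_seq = f'{op_n:{f_bit}}' # generate bit from number
--         if equation_is_correct(test, numbers, op_seq):
--             return True
--     return False
-- ===== SOURCE B (Python) =====
-- def operation_check(test, numbers):
--     values = {numbers[0]}
--     for number in numbers[1:]:
--         values = {r for v in values for r in (v + number, v * number) if r <= test}
--     return test in values
-- ===== Notes on version B (the rewrite author's own statement) =====
-- stated objective: alternative
-- what changed: A enumerates all 2^(n-1) operator bit-strings and simulates each equation; B does one forward pass keeping the deduplicated set of partial values reachable under the > test pruning, so shared prefixes are evaluated once (much cheaper when many prefixes collide or are pruned, though the set can still grow exponentially in the worst case).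
import Mathlib
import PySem

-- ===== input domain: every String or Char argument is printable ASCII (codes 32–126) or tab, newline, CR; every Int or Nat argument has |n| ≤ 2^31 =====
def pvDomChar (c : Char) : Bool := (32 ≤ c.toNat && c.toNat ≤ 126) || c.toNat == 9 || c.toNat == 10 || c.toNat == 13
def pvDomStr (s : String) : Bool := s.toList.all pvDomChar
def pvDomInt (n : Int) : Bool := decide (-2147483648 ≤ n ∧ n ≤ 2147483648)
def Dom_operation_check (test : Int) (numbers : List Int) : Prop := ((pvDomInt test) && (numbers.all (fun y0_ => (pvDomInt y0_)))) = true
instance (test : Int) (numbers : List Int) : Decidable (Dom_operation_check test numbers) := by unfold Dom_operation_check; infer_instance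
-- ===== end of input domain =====

-- B replaces A's enumeration of all 2^(n-1) operator strings by a single left-to-right pass
-- over the deduplicated set of reachable partial values (pruned at > test); return values agree.

-- ===== PORT A =====
-- loop body of equation_is_correct (early 'return False' = the false branch)
def eqLoop (test : Int) (value : Int) : List (Char × Int) → Bool
  | [] => value == test
  | (op, number) :: rest =>
    let value := if op == '0' then value + number
                 else if op == '1' then value * number
                 else value
    if value > test then false else eqLoop test value rest

def equation_is_correct (test : Int) (numbers : List Int) (op_seq : List Char) : Bool :=
  match PySem.List.pyGet? numbers 0 with
  | none => false   -- numbers[0] raises IndexError (excluded by Pre_)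
  | some v => eqLoop test v (op_seq.zip (PySem.List.slice numbers (some 1) none))

-- hand port of f'{op_n:0{n_bit}b}' (binary digits, most significant first; exact for op_n ≥ 0):
-- binary digits of a positive number, msb first
def binDigits : Nat → List Char
  | 0 => []
  | k+1 => binDigits ((k+1)/2) ++ [if (k+1) % 2 == 1 then '1' else '0']
decreasing_by exact Nat.div_lt_self (Nat.succ_pos k) (by omega)

-- zero-padded to width w; format(0, ...) prints '0'
def pyBinFmt (k w : Nat) : List Char :=
  List.replicate (w - (if k = 0 then ['0'] else binDigits k).length) '0'
    ++ (if k = 0 then ['0'] else binDigits k)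

def operation_check (test : Int) (numbers : List Int) : Bool :=
  match numbers with
  | [] => false   -- A raises TypeError here (range(2 ** -1)); excluded by Pre_
  | _ :: rest =>
    let n_bit := rest.length
    let n : Int := (2 : Int) ^ n_bit
    (PySem.List.pyRange 0 n 1).any (fun op_n =>
      equation_is_correct test numbers (pyBinFmt op_n.toNat n_bit))

-- ===== PORT B =====
-- one step of the set comprehension: all pruned successors of the current value set
def reachStep (test : Int) (vals : PySem.Set Int) (number : Int) : PySem.Set Int :=
  vals.foldl (fun acc v =>
    let acc := if v + number ≤ test then PySem.Set.add acc (v + number) else acc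
    if v * number ≤ test then PySem.Set.add acc (v * number) else acc) PySem.Set.empty

def operation_check_alt (test : Int) (numbers : List Int) : Bool :=
  match numbers with
  | [] => false   -- numbers[0] raises IndexError (excluded by Pre_)
  | x :: rest =>
    PySem.Set.contains (rest.foldl (reachStep test) (PySem.Set.ofList [x])) test

-- ===== PRECONDITION & SPEC =====
-- A raises on the empty list (TypeError via 2 ** -1 / range); B raises IndexError there too.
def Pre_operation_check (test : Int) (numbers : List Int) : Prop := numbers ≠ []
instance (test : Int) (numbers : List Int) : Decidable (Pre_operation_check test numbers) := by unfold Pre_operation_check; infer_instance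

def pvWitness_operation_check : Int × List Int := (5, [2, 3])

def Spec_operation_check (test : Int) (numbers : List Int) (out : Bool) : Prop := out = operation_check_alt test numbers
instance (test : Int) (numbers : List Int) (out : Bool) : Decidable (Spec_operation_check test numbers out) := by unfold Spec_operation_check; infer_instance

-- ===== CLAIM (what is proved, stated in full; the proofs are below) =====
def Claim_equal_operation_check : Prop := ∀ (test : Int) (numbers : List Int), Dom_operation_check test numbers → Pre_operation_check test numbers → Spec_operation_check test numbers (operation_check test numbers)

-- ===== LEMMAS AND PROOFS =====

-- exact-width binary representation, msb first (the common spec both ports are reduced to)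
def binW : Nat → Nat → List Char
  | 0, _ => []
  | w+1, k => binW w (k / 2) ++ [if k % 2 == 1 then '1' else '0']

-- existential over all operator sequences, with A's pruning, as a recursion on the numbers
def anyOps (test : Int) (v : Int) : List Int → Bool
  | [] => v == test
  | n :: rest =>
    (if v + n > test then false else anyOps test (v + n) rest) ||
    (if v * n > test then false else anyOps test (v * n) rest)

theorem binW_lo (w : Nat) : ∀ k, k < 2 ^ w → binW (w+1) k = '0' :: binW w k := by
  induction w with
  | zero => intro k hk; interval_cases k; rfl
  | succ w ih =>
    intro k hk
    have h2 : k / 2 < 2 ^ w := by omega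
    show binW (w+1) (k/2) ++ _ = '0' :: (binW w (k/2) ++ _)
    rw [ih _ h2]; simp

theorem binW_hi (w : Nat) : ∀ k, k < 2 ^ w → binW (w+1) (k + 2 ^ w) = '1' :: binW w k := by
  induction w with
  | zero => intro k hk; interval_cases k; rfl
  | succ w ih =>
    intro k hk
    have hd : (k + 2 ^ (w+1)) / 2 = k / 2 + 2 ^ w := by omega
    have hm : (k + 2 ^ (w+1)) % 2 = k % 2 := by omega
    have h2 : k / 2 < 2 ^ w := by omega
    show binW (w+1) ((k + 2^(w+1))/2) ++ [if (k + 2^(w+1)) % 2 == 1 then '1' else '0']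
       = '1' :: (binW w (k/2) ++ _)
    rw [hd, hm, ih _ h2]; simp

theorem binW_len : ∀ w k, (binW w k).length = w := by
  intro w; induction w with
  | zero => intro k; rfl
  | succ w ih => intro k; show (binW w (k/2) ++ _).length = _; simp [ih]

theorem binDigits_pos (k : Nat) (hk : 0 < k) :
    binDigits k = binDigits (k / 2) ++ [if k % 2 == 1 then '1' else '0'] := by
  cases k with
  | zero => omega
  | succ m => rw [binDigits]

theorem len_binDigits_le (w : Nat) : ∀ k, k < 2 ^ w → (binDigits k).length ≤ w := by
  induction w with
  | zero => intro k hk; interval_cases k; simp [binDigits]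
  | succ w ih =>
    intro k hk
    rcases Nat.eq_zero_or_pos k with h0 | h0
    · subst h0; simp [binDigits]
    · rw [binDigits_pos k h0]
      have := ih (k / 2) (by omega)
      simp; omega

theorem binDigits_eq_binW (w : Nat) : ∀ k, 2 ^ w ≤ k → k < 2 ^ (w+1) → binDigits k = binW (w+1) k := by
  induction w with
  | zero => intro k h1 h2; interval_cases k; simp [binDigits, binW]
  | succ w ih =>
    intro k h1 h2
    rw [binDigits_pos k (by omega)]
    have := ih (k / 2) (by omega) (by omega)
    show _ = binW (w+1) (k/2) ++ _
    rw [← this]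

theorem fmt_eq (w : Nat) : ∀ k, k < 2 ^ (w+1) → pyBinFmt k (w+1) = binW (w+1) k := by
  induction w with
  | zero =>
    intro k hk
    interval_cases k <;> simp [pyBinFmt, binDigits, binW]
  | succ w ih =>
    intro k hk
    by_cases hlo : k < 2 ^ (w+1)
    · have hds : (if k = 0 then ['0'] else binDigits k).length ≤ w + 1 := by
        by_cases h0 : k = 0
        · simp [h0]
        · simp only [h0, if_false]; exact len_binDigits_le (w+1) k hlo
      have hstep : pyBinFmt k (w+2) = '0' :: pyBinFmt k (w+1) := by
        unfold pyBinFmt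
        have hl : (w + 2) - (if k = 0 then ['0'] else binDigits k).length
                = ((w + 1) - (if k = 0 then ['0'] else binDigits k).length) + 1 := by omega
        rw [hl, List.replicate_succ]; simp
      rw [hstep, ih k hlo, binW_lo (w+1) k hlo]
    · have h1 : 2 ^ (w+1) ≤ k := by omega
      have hne : k ≠ 0 := by have := Nat.one_le_two_pow (n := w+1); omega
      have hbd : binDigits k = binW (w+2) k := binDigits_eq_binW (w+1) k h1 hk
      unfold pyBinFmt
      rw [if_neg hne, hbd, binW_len]
      simp

theorem exists_split (m : Nat) (P : Nat → Prop) :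
    (∃ k, k < 2 * m ∧ P k) ↔ (∃ k, k < m ∧ P k) ∨ (∃ k, k < m ∧ P (k + m)) := by
  constructor
  · rintro ⟨k, hk, hP⟩
    by_cases h : k < m
    · exact Or.inl ⟨k, h, hP⟩
    · refine Or.inr ⟨k - m, by omega, ?_⟩
      have : k - m + m = k := by omega
      rw [this]; exact hP
  · rintro (⟨k, hk, hP⟩ | ⟨k, hk, hP⟩)
    · exact ⟨k, by omega, hP⟩
    · exact ⟨k + m, by omega, hP⟩

theorem A_eq_anyOps (test : Int) : ∀ (rest : List Int) (x : Int),
    ((∃ k, k < 2 ^ rest.length ∧ eqLoop test x ((binW rest.length k).zip rest) = true)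
      ↔ anyOps test x rest = true) := by
  intro rest
  induction rest with
  | nil =>
    intro x
    simp [binW, eqLoop, anyOps]
  | cons n t ih =>
    intro x
    have hpow : 2 ^ (n :: t).length = 2 * 2 ^ t.length := by
      simp [List.length_cons, pow_succ]; ring
    rw [hpow, exists_split]
    have hlo : ∀ k, k < 2 ^ t.length →
        ((binW (n :: t).length k).zip (n :: t)
          = ('0', n) :: (binW t.length k).zip t) := by
      intro k hk
      simp only [List.length_cons]
      rw [binW_lo t.length k hk]; rfl
    have hhi : ∀ k, k < 2 ^ t.length →
        ((binW (n :: t).length (k + 2 ^ t.length)).zip (n :: t)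
          = ('1', n) :: (binW t.length k).zip t) := by
      intro k hk
      simp only [List.length_cons]
      rw [binW_hi t.length k hk]; rfl
    have e0 : ∀ ps, eqLoop test x (('0', n) :: ps)
        = if x + n > test then false else eqLoop test (x + n) ps := by
      intro ps; simp [eqLoop]
    have e1 : ∀ ps, eqLoop test x (('1', n) :: ps)
        = if x * n > test then false else eqLoop test (x * n) ps := by
      intro ps; simp [eqLoop]
    have hL : (∃ k, k < 2 ^ t.length ∧
          eqLoop test x ((binW (n :: t).length k).zip (n :: t)) = true)
        ↔ (if x + n > test then false else anyOps test (x + n) t) = true := by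
      by_cases hc : x + n > test
      · simp only [hc, if_true]
        constructor
        · rintro ⟨k, hk, hP⟩
          rw [hlo k hk, e0, if_pos hc] at hP; exact absurd hP (by simp)
        · simp
      · simp only [hc, if_false]
        rw [← ih (x + n)]
        constructor
        · rintro ⟨k, hk, hP⟩
          rw [hlo k hk, e0, if_neg hc] at hP; exact ⟨k, hk, hP⟩
        · rintro ⟨k, hk, hP⟩
          exact ⟨k, hk, by rw [hlo k hk, e0, if_neg hc]; exact hP⟩
    have hH : (∃ k, k < 2 ^ t.length ∧
          eqLoop test x ((binW (n :: t).length (k + 2 ^ t.length)).zip (n :: t)) = true)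
        ↔ (if x * n > test then false else anyOps test (x * n) t) = true := by
      by_cases hc : x * n > test
      · simp only [hc, if_true]
        constructor
        · rintro ⟨k, hk, hP⟩
          rw [hhi k hk, e1, if_pos hc] at hP; exact absurd hP (by simp)
        · simp
      · simp only [hc, if_false]
        rw [← ih (x * n)]
        constructor
        · rintro ⟨k, hk, hP⟩
          rw [hhi k hk, e1, if_neg hc] at hP; exact ⟨k, hk, hP⟩
        · rintro ⟨k, hk, hP⟩
          exact ⟨k, hk, by rw [hhi k hk, e1, if_neg hc]; exact hP⟩
    rw [hL, hH]
    simp [anyOps]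

theorem mem_body (test n y v : Int) (acc : PySem.Set Int) :
    (y ∈ (if v * n ≤ test
            then PySem.Set.add (if v + n ≤ test then PySem.Set.add acc (v + n) else acc) (v * n)
            else (if v + n ≤ test then PySem.Set.add acc (v + n) else acc)))
      ↔ y ∈ acc ∨ ((y = v + n ∧ v + n ≤ test) ∨ (y = v * n ∧ v * n ≤ test)) := by
  split_ifs with h1 h2 h2 <;> simp [PySem.Set.mem_add, h1, h2] <;> tauto

theorem mem_reach_aux (test n y : Int) :
    ∀ (l : List Int) (acc : PySem.Set Int),
    (y ∈ l.foldl (fun acc v =>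
        let acc := if v + n ≤ test then PySem.Set.add acc (v + n) else acc
        if v * n ≤ test then PySem.Set.add acc (v * n) else acc) acc
      ↔ y ∈ acc ∨ ∃ v ∈ l, (y = v + n ∧ v + n ≤ test) ∨ (y = v * n ∧ v * n ≤ test)) := by
  intro l
  induction l with
  | nil => intro acc; simp
  | cons v l ih =>
    intro acc
    rw [List.foldl_cons, ih]
    simp only [mem_body, List.exists_mem_cons_iff]
    rw [or_assoc]

theorem if_false_eq_true_iff (c : Prop) [Decidable c] (b : Bool) :
    ((if c then false else b) = true ↔ ¬ c ∧ b = true) := by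
  split_ifs with h <;> simp [h]

theorem anyOps_cons (test v n : Int) (t : List Int) :
    (anyOps test v (n :: t) = true
      ↔ (v + n ≤ test ∧ anyOps test (v + n) t = true)
        ∨ (v * n ≤ test ∧ anyOps test (v * n) t = true)) := by
  simp only [anyOps, Bool.or_eq_true, if_false_eq_true_iff, not_lt]

theorem foldB (test : Int) : ∀ (rest : List Int) (S : PySem.Set Int),
    ((test ∈ rest.foldl (reachStep test) S) ↔ ∃ v ∈ S, anyOps test v rest = true) := by
  intro rest
  induction rest with
  | nil =>
    intro S
    constructor
    · intro h; exact ⟨test, h, by simp [anyOps]⟩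
    · rintro ⟨v, hv, he⟩
      have : v = test := by simpa [anyOps] using he
      subst this; exact hv
  | cons n t ih =>
    intro S
    rw [List.foldl_cons, ih]
    constructor
    · rintro ⟨v', hv', hP⟩
      rw [reachStep, mem_reach_aux] at hv'
      rcases hv' with h | ⟨v, hv, hcase⟩
      · exact absurd h (by simp [PySem.Set.empty])
      · refine ⟨v, hv, ?_⟩
        rw [anyOps_cons]
        rcases hcase with ⟨rfl, hle⟩ | ⟨rfl, hle⟩
        · exact Or.inl ⟨hle, hP⟩
        · exact Or.inr ⟨hle, hP⟩
    · rintro ⟨v, hv, hP⟩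
      rw [anyOps_cons] at hP
      rcases hP with ⟨hle, hP⟩ | ⟨hle, hP⟩
      · exact ⟨v + n, by rw [reachStep, mem_reach_aux]; right; exact ⟨v, hv, Or.inl ⟨rfl, hle⟩⟩, hP⟩
      · exact ⟨v * n, by rw [reachStep, mem_reach_aux]; right; exact ⟨v, hv, Or.inr ⟨rfl, hle⟩⟩, hP⟩

theorem zip_fmt (w k : Nat) (rest : List Int) (hlen : rest.length = w) (hk : k < 2 ^ w) :
    (pyBinFmt k w).zip rest = (binW w k).zip rest := by
  cases w with
  | zero =>
    have : rest = [] := List.eq_nil_of_length_eq_zero hlen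
    subst this; simp [List.zip_nil_right]
  | succ w => rw [fmt_eq w k hk]

theorem operation_check_spec : Claim_equal_operation_check := by
  intro test numbers _ hpre
  unfold Spec_operation_check
  cases numbers with
  | nil => exact absurd rfl hpre
  | cons x rest =>
    rw [Bool.eq_iff_iff]
    have hcastpow : ((2 : Int) ^ rest.length) = ((2 ^ rest.length : Nat) : Int) := by
      push_cast; ring
    have hlen : (((2 : Int) ^ rest.length) - 0).toNat = 2 ^ rest.length := by
      rw [sub_zero, hcastpow, Int.toNat_natCast]
    have heq : ∀ k : Nat, k < 2 ^ rest.length →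
        (equation_is_correct test (x :: rest) (pyBinFmt k rest.length)
          = eqLoop test x ((binW rest.length k).zip rest)) := by
      intro k hk
      simp only [equation_is_correct, PySem.List.pyGet?_zero_cons, PySem.List.slice_from_one,
        List.tail_cons]
      rw [zip_fmt rest.length k rest rfl hk]
    have hA : operation_check test (x :: rest) = true
        ↔ ∃ k, k < 2 ^ rest.length ∧ eqLoop test x ((binW rest.length k).zip rest) = true := by
      show ((PySem.List.pyRange 0 ((2 : Int) ^ rest.length) 1).any
        (fun op_n => equation_is_correct test (x :: rest) (pyBinFmt op_n.toNat rest.length))) = true ↔ _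
      rw [PySem.List.pyRange_one, List.any_map, List.any_eq_true]
      constructor
      · rintro ⟨k, hk, hP⟩
        rw [List.mem_range, hlen] at hk
        refine ⟨k, hk, ?_⟩
        simp only [Function.comp_apply, zero_add, Int.toNat_natCast] at hP
        rwa [heq k hk] at hP
      · rintro ⟨k, hk, hP⟩
        refine ⟨k, ?_, ?_⟩
        · rw [List.mem_range, hlen]; exact hk
        · simp only [Function.comp_apply, zero_add, Int.toNat_natCast]
          rwa [heq k hk]
    have hB : operation_check_alt test (x :: rest) = true
        ↔ test ∈ rest.foldl (reachStep test) (PySem.Set.ofList [x]) := by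
      show PySem.Set.contains _ test = true ↔ _
      exact PySem.Set.contains_iff _ _
    rw [hA, hB, A_eq_anyOps test rest x, foldB test rest]
    constructor
    · intro h; exact ⟨x, by simp [PySem.Set.ofList, PySem.Set.add, PySem.Set.empty], h⟩
    · rintro ⟨v, hv, hP⟩
      have : v = x := by
        simpa [PySem.Set.ofList, PySem.Set.add, PySem.Set.empty] using hv
      subst this; exact hP
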